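-- pv_equiv track=rewrite | github.com/TheTimelessPuppeteer/chi-saho-wei-2026-python | weeks/week-07/solutions/1114405013/solution_question_10093.py | max_artillery
-- ===== SOURCE A (Python) =====
-- def generate_row_states(width):
--     """產生單列可行狀態（忽略地形）。
--
--     一個整數 state 的二進位表示代表該列各欄是否放炮兵：
--     - bit = 1 表示該欄放炮兵
--     - bit = 0 表示不放
--
--     本函式只先處理「同一列內部」衝突，
--     所以會過濾掉含有距離 1 或 2 衝突的 state。
--     """
--     states = []
--     for state in range(1 << width):
--         # 同一列中，左右相鄰與隔一格都會互相攻擊。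
--         if state & (state << 1):
--             continue
--         if state & (state << 2):
--             continue
--         states.append(state)
--     return states
--
-- def max_artillery(grid):
--     """回傳可放置的最大炮兵數量。
--
--     DP 狀態定義：
--     - dp[(prev1, prev2)] = 已處理到目前列時，
--       其中前一列狀態為 prev1、前二列狀態為 prev2 的最大炮兵數。
--     """
--     rows = len(grid)
--     cols = len(grid[0]) if rows else 0
--
--     # 所有「單列內部不衝突」的候選狀態。
--     all_states = generate_row_states(cols)
--
--     # 每個狀態含有幾支炮兵，先預算好避免重複計算。
--     bit_count = {state: state.bit_count() for state in all_states}
--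
--     # plain_masks[r]：第 r 列可放置位置（P 為 1，H 為 0）
--     plain_masks = []
--     for row in grid:
--         mask = 0
--         for c, ch in enumerate(row):
--             if ch == "P":
--                 mask |= 1 << c
--         plain_masks.append(mask)
--
--     # 每一列在地形限制下的可行狀態。
--     # 也就是：這列為 H 的欄位一定不能出現在 state 中。
--     row_states = []
--     for r in range(rows):
--         valid = []
--         for state in all_states:
--             if state & ~plain_masks[r]:
--                 continue
--             valid.append(state)
--         row_states.append(valid)
--
--     # 初始時，前一列與前二列都視為空列（狀態 0），
--     # 最大值為 0。
--     dp = {(0, 0): 0}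
--
--     for r in range(rows):
--         next_dp = {}
--         for (prev1, prev2), value in dp.items():
--             for cur in row_states[r]:
--                 # 垂直距離 1 與 2 不能同欄同時放。
--                 # cur 與 prev1 衝突 -> 距離 1
--                 # cur 與 prev2 衝突 -> 距離 2
--                 if cur & prev1:
--                     continue
--                 if cur & prev2:
--                     continue
--
--                 # 處理完本列後，下一輪的前一列會變成 cur，
--                 # 下一輪的前二列會變成現在的 prev1。
--                 key = (cur, prev1)
--                 candidate = value + bit_count[cur]
--                 if candidate > next_dp.get(key, -1):
--                     next_dp[key] = candidate
--
--         dp = next_dp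
--
--     return max(dp.values()) if dp else 0
-- ===== SOURCE B (Python) =====
-- def generate_row_states(width):
--     states = []
--     for state in range(1 << width):
--         if state & (state << 1):
--             continue
--         if state & (state << 2):
--             continue
--         states.append(state)
--     return states
--
--
-- def max_artillery(grid):
--     """Backward (suffix) DP: suffix[(p1, p2)] = best placement count for the
--     remaining rows given the previous two row states, computed from the last
--     row up to the first; the answer is read off directly at (0, 0)."""
--     rows = len(grid)
--     cols = len(grid[0]) if rows else 0
--
--     all_states = generate_row_states(cols)
--     bit_count = {state: state.bit_count() for state in all_states}
--
--     row_states = []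
--     for row in grid:
--         mask = 0
--         for c, ch in enumerate(row):
--             if ch == "P":
--                 mask |= 1 << c
--         row_states.append([s for s in all_states if not (s & ~mask)])
--
--     suffix = {}
--     for r in range(rows - 1, -1, -1):
--         prev1s = row_states[r - 1] if r >= 1 else [0]
--         prev2s = row_states[r - 2] if r >= 2 else [0]
--         nxt = suffix
--         suffix = {}
--         for p1 in prev1s:
--             for p2 in prev2s:
--                 best = 0
--                 for cur in row_states[r]:
--                     if cur & p1 or cur & p2:
--                         continue
--                     v = bit_count[cur] + nxt.get((cur, p1), 0)
--                     if v > best: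
--                         best = v
--                 suffix[(p1, p2)] = best
--
--     return suffix.get((0, 0), 0)
-- ===== Notes on version B (the rewrite author's own statement) =====
-- stated objective: alternative
-- what changed: A sweeps a forward DP dict of reachable (prev1, prev2) state pairs row by row and takes a final max over all dict values; B computes a backward suffix-DP table (best placement count for the remaining rows given the previous two row states), built from the last row up to the first, and reads the answer directly at (0, 0) with no final max.
import Mathlib
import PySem

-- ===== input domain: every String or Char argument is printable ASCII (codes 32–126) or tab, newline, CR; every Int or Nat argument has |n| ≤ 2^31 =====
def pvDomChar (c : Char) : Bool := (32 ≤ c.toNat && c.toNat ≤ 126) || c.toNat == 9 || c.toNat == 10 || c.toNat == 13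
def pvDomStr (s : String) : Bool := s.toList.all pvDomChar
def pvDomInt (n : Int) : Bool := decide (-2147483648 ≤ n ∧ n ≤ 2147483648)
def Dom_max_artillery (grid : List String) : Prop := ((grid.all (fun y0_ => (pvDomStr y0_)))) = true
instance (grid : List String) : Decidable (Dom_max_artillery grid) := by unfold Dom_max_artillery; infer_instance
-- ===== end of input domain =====

-- B re-decomposes A's forward reachable-pair dict DP (with a final max over values) as a
-- backward suffix-table DP read off directly at (0, 0); same results, no speed claim.

-- ===== PORT A =====

-- generate_row_states(width): the loop over range(1 << width) with the two skip tests.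
-- width = len(grid[0]) ≥ 0 always, so '.toNat' on it is exact.
def generateRowStates (width : Int) : List Int :=
  (PySem.List.pyRange 0 ((1:Int) <<< width.toNat) 1).foldl
    (fun states state =>
      if PySem.Int.band state (state <<< (1:Nat)) ≠ 0 then states
      else if PySem.Int.band state (state <<< (2:Nat)) ≠ 0 then states
      else states ++ [state]) []

-- bit_count = {state: state.bit_count() for state in all_states}
def bitCountDict (allStates : List Int) : PySem.Dict Int Int :=
  allStates.foldl (fun d state => d.insert state (PySem.Int.bitCount state : Int)) PySem.Dict.empty

-- mask for one row: for c, ch in enumerate(row): if ch == 'P': mask |= 1 << c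
-- (c ≥ 0 from enumerate, so '.toNat' on it is exact)
def rowMask (row : String) : Int :=
  (PySem.List.enumerate row.toList 0).foldl
    (fun mask cch => if cch.2 = 'P' then PySem.Int.bor mask ((1:Int) <<< cch.1.toNat) else mask) 0

def max_artillery (grid : List String) : Int :=
  let rows : Int := PySem.List.len grid
  let cols : Int := if rows ≠ 0 then PySem.Str.len (PySem.List.pyGetD grid 0 "") else 0
  let allStates := generateRowStates cols
  let bitCount := bitCountDict allStates
  let plainMasks : List Int := grid.foldl (fun ms row => ms ++ [rowMask row]) []
  let rowStates : List (List Int) :=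
    (PySem.List.pyRange 0 rows 1).foldl
      (fun rss r =>
        rss ++ [allStates.foldl
          (fun valid state =>
            if PySem.Int.band state (Int.not (PySem.List.pyGetD plainMasks r 0)) ≠ 0 then valid
            else valid ++ [state]) []]) []
  let dp0 : PySem.Dict (Int × Int) Int := PySem.Dict.empty.insert (0, 0) 0
  let dpF : PySem.Dict (Int × Int) Int :=
    (PySem.List.pyRange 0 rows 1).foldl
      (fun dp r =>
        dp.items.foldl
          (fun nextDp kv =>
            (PySem.List.pyGetD rowStates r []).foldl
              (fun nextDp cur =>
                if PySem.Int.band cur kv.1.1 ≠ 0 then nextDp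
                else if PySem.Int.band cur kv.1.2 ≠ 0 then nextDp
                else
                  -- bit_count[cur]: cur is drawn from all_states, so the key is present
                  -- and 'getD … 0' returns exactly the stored count.
                  let candidate := kv.2 + bitCount.getD cur 0
                  if candidate > nextDp.getD (cur, kv.1.1) (-1) then
                    nextDp.insert (cur, kv.1.1) candidate
                  else nextDp) nextDp) PySem.Dict.empty) dp0
  -- return max(dp.values()) if dp else 0
  if dpF.size ≠ 0 then (PySem.List.max? dpF.values (fun v => v)).getD 0 else 0

-- ===== PORT B =====

-- B's per-row valid states: mask loop, then the comprehension filter over all_states.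
def rowStatesB (grid : List String) (allStates : List Int) : List (List Int) :=
  grid.foldl
    (fun rss row => rss ++ [allStates.filter (fun s => PySem.Int.band s (Int.not (rowMask row)) = 0)]) []

def max_artillery_alt (grid : List String) : Int :=
  let rows : Int := PySem.List.len grid
  let cols : Int := if rows ≠ 0 then PySem.Str.len (PySem.List.pyGetD grid 0 "") else 0
  let allStates := generateRowStates cols
  let bitCount := bitCountDict allStates
  let rowStates := rowStatesB grid allStates
  -- for r in range(rows-1, -1, -1): rebuild 'suffix' from 'nxt'
  let suffix : PySem.Dict (Int × Int) Int :=
    (PySem.List.pyRange (rows - 1) (-1) (-1)).foldl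
      (fun nxt r =>
        let prev1s := if r ≥ 1 then PySem.List.pyGetD rowStates (r - 1) [] else [0]
        let prev2s := if r ≥ 2 then PySem.List.pyGetD rowStates (r - 2) [] else [0]
        prev1s.foldl
          (fun suf p1 =>
            prev2s.foldl
              (fun suf p2 =>
                let best :=
                  (PySem.List.pyGetD rowStates r []).foldl
                    (fun best cur =>
                      if PySem.Int.band cur p1 ≠ 0 ∨ PySem.Int.band cur p2 ≠ 0 then best
                      else
                        -- bit_count[cur]: key always present (cur ∈ all_states)
                        let v := bitCount.getD cur 0 + nxt.getD (cur, p1) 0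
                        if v > best then v else best) 0
                suf.insert (p1, p2) best) suf) PySem.Dict.empty) PySem.Dict.empty
  suffix.getD (0, 0) 0



-- ===== PRECONDITION & SPEC =====
def Spec_max_artillery (grid : List String) (out : Int) : Prop := out = max_artillery_alt grid
instance (grid : List String) (out : Int) : Decidable (Spec_max_artillery grid out) := by unfold Spec_max_artillery; infer_instance

-- ===== CLAIM (what is proved, stated in full; the proofs are below) =====
def Claim_equal_max_artillery : Prop := ∀ (grid : List String), Dom_max_artillery grid → Spec_max_artillery grid (max_artillery grid)

-- ===== LEMMAS AND PROOFS =====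

-- generic max-fold trio
theorem pvMaxfold_ge_init {α : Type} (l : List α) (p : α → Prop) [DecidablePred p] (f : α → Int) (a : Int) :
    a ≤ l.foldl (fun m x => if p x then max m (f x) else m) a := by
  induction l generalizing a with
  | nil => simp
  | cons x t ih =>
    simp only [List.foldl_cons]
    refine le_trans ?_ (ih _)
    split_ifs <;> simp

theorem pvMaxfold_ub {α : Type} (l : List α) (p : α → Prop) [DecidablePred p] (f : α → Int) (x : α) (hx : x ∈ l) (hp : p x) (a : Int) :
    f x ≤ l.foldl (fun m y => if p y then max m (f y) else m) a := by
  induction l generalizing a with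
  | nil => simp at hx
  | cons y t ih =>
    simp only [List.foldl_cons]
    rcases List.mem_cons.mp hx with h | h
    · subst h
      refine le_trans ?_ (pvMaxfold_ge_init t p f _)
      simp [hp]
    · exact ih h _

theorem pvMaxfold_attained {α : Type} (l : List α) (p : α → Prop) [DecidablePred p] (f : α → Int) (a : Int) :
    l.foldl (fun m x => if p x then max m (f x) else m) a = a ∨
      ∃ x ∈ l, p x ∧ l.foldl (fun m x => if p x then max m (f x) else m) a = f x := by
  induction l generalizing a with
  | nil => left; simp
  | cons y t ih =>
    simp only [List.foldl_cons]
    by_cases hp : p y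
    · rcases ih (max a (f y)) with h | ⟨x, hx, hpx, hfx⟩
      · simp only [hp, if_true] at h ⊢
        rw [h]
        rcases max_choice a (f y) with h' | h'
        · left; exact h'
        · right; exact ⟨y, List.mem_cons_self, hp, h'⟩
      · right
        simp only [hp, if_true]
        exact ⟨x, List.mem_cons_of_mem _ hx, hpx, hfx⟩
    · simp only [hp, if_false]
      rcases ih a with h | ⟨x, hx, hpx, hfx⟩
      · left; exact h
      · right; exact ⟨x, List.mem_cons_of_mem _ hx, hpx, hfx⟩

def pvUpd (d : PySem.Dict (Int × Int) Int) (k : Int × Int) (v : Int) : PySem.Dict (Int × Int) Int :=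
  if v > d.getD k (-1) then d.insert k v else d

theorem pvUpdFold_getD (P : List ((Int × Int) × Int)) (d : PySem.Dict (Int × Int) Int) (k : Int × Int) :
    (P.foldl (fun d kv => pvUpd d kv.1 kv.2) d).getD k (-1)
      = P.foldl (fun m kv => if kv.1 = k then max m kv.2 else m) (d.getD k (-1)) := by
  induction P generalizing d with
  | nil => simp
  | cons kv t ih =>
    simp only [List.foldl_cons]
    rw [ih]
    congr 1
    unfold pvUpd
    by_cases hk : kv.1 = k
    · subst hk
      rw [if_pos rfl]
      split_ifs with h
      · rw [PySem.Dict.getD_insert, if_pos rfl]; omega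
      · omega
    · rw [if_neg hk]
      split_ifs with h
      · rw [PySem.Dict.getD_insert, if_neg (fun hh => hk hh.symm)]
      · rfl

theorem pvUpdFold_nodup (P : List ((Int × Int) × Int)) (d : PySem.Dict (Int × Int) Int)
    (h : d.keys.Nodup) : (P.foldl (fun d kv => pvUpd d kv.1 kv.2) d).keys.Nodup := by
  induction P generalizing d with
  | nil => exact h
  | cons kv t ih =>
    simp only [List.foldl_cons]
    apply ih
    unfold pvUpd
    split_ifs
    · exact PySem.Dict.nodup_keys_insert _ _ _ h
    · exact h

theorem pvUpdFold_mem_keys (P : List ((Int × Int) × Int)) (d : PySem.Dict (Int × Int) Int)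
    (hP : ∀ kv ∈ P, 0 ≤ kv.2) (k : Int × Int) :
    k ∈ (P.foldl (fun d kv => pvUpd d kv.1 kv.2) d).keys ↔ k ∈ d.keys ∨ ∃ kv ∈ P, kv.1 = k := by
  induction P generalizing d with
  | nil => simp
  | cons kv t ih =>
    simp only [List.foldl_cons]
    rw [ih _ (fun kv h => hP kv (List.mem_cons_of_mem _ h))]
    constructor
    · rintro (hmem | ⟨kv', hkv', hk⟩)
      · unfold pvUpd at hmem
        split_ifs at hmem with h
        · rcases (PySem.Dict.mem_keys_insert _ _ _ _).mp hmem with h' | h'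
          · right; exact ⟨kv, List.mem_cons_self, h'.symm⟩
          · left; exact h'
        · left; exact hmem
      · right; exact ⟨kv', List.mem_cons_of_mem _ hkv', hk⟩
    · rintro (hmem | ⟨kv', hkv', hk⟩)
      · left
        unfold pvUpd
        split_ifs
        · exact (PySem.Dict.mem_keys_insert _ _ _ _).mpr (Or.inr hmem)
        · exact hmem
      · rcases List.mem_cons.mp hkv' with h' | h'
        · subst h'
          left
          unfold pvUpd
          by_cases hin : kv'.2 > d.getD kv'.1 (-1)
          · rw [if_pos hin, hk]
            exact (PySem.Dict.mem_keys_insert _ _ _ _).mpr (Or.inl rfl)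
          · rw [if_neg hin]
            subst hk
            by_contra hnk
            have hc : d.getD kv'.1 (-1) = -1 := by
              apply PySem.Dict.getD_of_not_contains
              rw [PySem.Dict.contains_eq_decide_mem_keys]
              simp [hnk]
            have h0 := hP kv' List.mem_cons_self
            omega
        · right; exact ⟨kv', h', hk⟩

-- flatten nested fold over a flatMap
theorem pvFoldl_flatMap {α β γ : Type} (l : List α) (F : α → List β) (g : γ → β → γ) (e : γ) :
    l.foldl (fun a x => (F x).foldl g a) e = (l.flatMap F).foldl g e := by
  induction l generalizing e with
  | nil => simp
  | cons x t ih => simp [List.foldl_append, ih]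

def pvBC (s : Int) : Int := (PySem.Int.bitCount s : Int)

def bestRec : List (List Int) → Int → Int → Int
  | [], _, _ => 0
  | vs :: rest, p1, p2 =>
    vs.foldl (fun best cur =>
      if PySem.Int.band cur p1 = 0 ∧ PySem.Int.band cur p2 = 0
      then max best (pvBC cur + bestRec rest cur p1) else best) 0

theorem pvBC_nonneg (s : Int) : 0 ≤ pvBC s := by
  unfold pvBC; exact Int.natCast_nonneg _

theorem pvBand_zero_left (a : Int) : PySem.Int.band 0 a = 0 := by
  rw [PySem.Int.band_comm]; exact PySem.Int.band_zero _

theorem bestRec_nonneg (rs : List (List Int)) (p1 p2 : Int) : 0 ≤ bestRec rs p1 p2 := by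
  cases rs with
  | nil => simp [bestRec]
  | cons vs rest =>
    exact pvMaxfold_ge_init vs _ _ 0

def pvProps (vs : List Int) (items : List ((Int × Int) × Int)) : List ((Int × Int) × Int) :=
  items.flatMap (fun kv =>
    (vs.filter (fun c => decide (PySem.Int.band c kv.1.1 = 0 ∧ PySem.Int.band c kv.1.2 = 0))).map
      (fun c => ((c, kv.1.1), kv.2 + pvBC c)))

theorem mem_pvProps (vs : List Int) (items : List ((Int × Int) × Int)) (q : (Int × Int) × Int) :
    q ∈ pvProps vs items ↔
      ∃ kv ∈ items, ∃ c ∈ vs, PySem.Int.band c kv.1.1 = 0 ∧ PySem.Int.band c kv.1.2 = 0 ∧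
        q = ((c, kv.1.1), kv.2 + pvBC c) := by
  simp only [pvProps, List.mem_flatMap, List.mem_map, List.mem_filter, decide_eq_true_eq]
  constructor
  · rintro ⟨kv, hkv, c, ⟨hc, h1, h2⟩, rfl⟩
    exact ⟨kv, hkv, c, hc, h1, h2, rfl⟩
  · rintro ⟨kv, hkv, c, hc, h1, h2, rfl⟩
    exact ⟨kv, hkv, c, ⟨hc, h1, h2⟩, rfl⟩

def pvStepA (vs : List Int) (D : PySem.Dict (Int × Int) Int) : PySem.Dict (Int × Int) Int :=
  (pvProps vs D.items).foldl (fun d kv => pvUpd d kv.1 kv.2) PySem.Dict.empty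

def pvM (D : PySem.Dict (Int × Int) Int) (rest : List (List Int)) : Option Int :=
  PySem.List.max? (D.items.map (fun kv => kv.2 + bestRec rest kv.1.1 kv.1.2)) (fun v => v)

def pvGood (D : PySem.Dict (Int × Int) Int) : Prop :=
  D.items ≠ [] ∧ D.keys.Nodup ∧ ∀ kv ∈ D.items, 0 ≤ kv.2

def pvContrib (items : List ((Int × Int) × Int)) (vs : List Int) (rest : List (List Int)) (x : Int) : Prop :=
  ∃ kv ∈ items, ∃ c ∈ vs, PySem.Int.band c kv.1.1 = 0 ∧ PySem.Int.band c kv.1.2 = 0 ∧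
    x = kv.2 + pvBC c + bestRec rest c kv.1.1

theorem pvProps_nonneg (vs : List Int) (items : List ((Int × Int) × Int))
    (hv : ∀ kv ∈ items, 0 ≤ kv.2) : ∀ q ∈ pvProps vs items, 0 ≤ q.2 := by
  intro q hq
  rcases (mem_pvProps vs items q).mp hq with ⟨kv, hkv, c, _, _, _, rfl⟩
  have := hv kv hkv
  have := pvBC_nonneg c
  simp
  omega

-- bestRec on a cons: value attained by some compatible state (0 is always compatible)
theorem bestRec_cons_attained (vs : List Int) (rest : List (List Int)) (p1 p2 : Int) (h0 : (0:Int) ∈ vs) :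
    ∃ c ∈ vs, PySem.Int.band c p1 = 0 ∧ PySem.Int.band c p2 = 0 ∧
      bestRec (vs :: rest) p1 p2 = pvBC c + bestRec rest c p1 := by
  have hok0 : PySem.Int.band (0:Int) p1 = 0 ∧ PySem.Int.band (0:Int) p2 = 0 :=
    ⟨pvBand_zero_left p1, pvBand_zero_left p2⟩
  rcases pvMaxfold_attained vs (fun cur => PySem.Int.band cur p1 = 0 ∧ PySem.Int.band cur p2 = 0)
      (fun cur => pvBC cur + bestRec rest cur p1) 0 with h | ⟨c, hc, hok, hval⟩
  · -- fold = 0: the c = 0 term is squeezed to 0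
    have hub := pvMaxfold_ub vs (fun cur => PySem.Int.band cur p1 = 0 ∧ PySem.Int.band cur p2 = 0)
      (fun cur => pvBC cur + bestRec rest cur p1) 0 h0 hok0 0
    have hnn := bestRec_nonneg rest 0 p1
    have hbc0 : pvBC 0 = 0 := by decide
    refine ⟨0, h0, hok0.1, hok0.2, ?_⟩
    show bestRec (vs :: rest) p1 p2 = pvBC 0 + bestRec rest 0 p1
    have hfold : bestRec (vs :: rest) p1 p2 =
        vs.foldl (fun best cur =>
          if PySem.Int.band cur p1 = 0 ∧ PySem.Int.band cur p2 = 0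
          then max best (pvBC cur + bestRec rest cur p1) else best) 0 := rfl
    simp only [hbc0] at hub ⊢
    rw [hfold, h]
    omega
  · exact ⟨c, hc, hok.1, hok.2, hval⟩

theorem bestRec_cons_ub (vs : List Int) (rest : List (List Int)) (p1 p2 c : Int) (hc : c ∈ vs)
    (h1 : PySem.Int.band c p1 = 0) (h2 : PySem.Int.band c p2 = 0) :
    pvBC c + bestRec rest c p1 ≤ bestRec (vs :: rest) p1 p2 :=
  pvMaxfold_ub vs (fun cur => PySem.Int.band cur p1 = 0 ∧ PySem.Int.band cur p2 = 0)
    (fun cur => pvBC cur + bestRec rest cur p1) c hc ⟨h1, h2⟩ 0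

-- the RHS max is the max of the contribution set
theorem pvM_cons_isMax (D : PySem.Dict (Int × Int) Int) (vs : List Int) (rest : List (List Int))
    (s : Int) (h0 : (0:Int) ∈ vs) (hM : pvM D (vs :: rest) = some s) :
    pvContrib D.items vs rest s ∧ ∀ x, pvContrib D.items vs rest x → x ≤ s := by
  constructor
  · rcases List.mem_map.mp (PySem.List.max?_mem hM) with ⟨kv, hkv, hs⟩
    rcases bestRec_cons_attained vs rest kv.1.1 kv.1.2 h0 with ⟨c, hc, hc1, hc2, hval⟩
    exact ⟨kv, hkv, c, hc, hc1, hc2, by omega⟩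
  · rintro x ⟨kv, hkv, c, hc, hc1, hc2, rfl⟩
    have hub := bestRec_cons_ub vs rest kv.1.1 kv.1.2 c hc hc1 hc2
    have hle := PySem.List.max?_isMax hM (kv.2 + bestRec (vs :: rest) kv.1.1 kv.1.2)
      (List.mem_map.mpr ⟨kv, hkv, rfl⟩)
    simp only at hle
    omega

theorem pvStepA_nodup (vs : List Int) (D : PySem.Dict (Int × Int) Int) :
    (pvStepA vs D).keys.Nodup := by
  unfold pvStepA
  apply pvUpdFold_nodup
  simp [PySem.Dict.keys_empty]

theorem pvStepA_mem_keys (vs : List Int) (D : PySem.Dict (Int × Int) Int)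
    (hv : ∀ kv ∈ D.items, 0 ≤ kv.2) (k : Int × Int) :
    k ∈ (pvStepA vs D).keys ↔ ∃ q ∈ pvProps vs D.items, q.1 = k := by
  unfold pvStepA
  rw [pvUpdFold_mem_keys _ _ (pvProps_nonneg vs D.items hv) k]
  simp [PySem.Dict.keys_empty]

-- every item value of pvStepA is the max over its key's proposals
theorem pvStepA_item_val (vs : List Int) (D : PySem.Dict (Int × Int) Int)
    (hv : ∀ kv ∈ D.items, 0 ≤ kv.2) (kv : (Int × Int) × Int) (hkv : kv ∈ (pvStepA vs D).items) :
    (∃ q ∈ pvProps vs D.items, q.1 = kv.1 ∧ kv.2 = q.2) ∧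
      (∀ q ∈ pvProps vs D.items, q.1 = kv.1 → q.2 ≤ kv.2) := by
  have hnodup := pvStepA_nodup vs D
  have hval : kv.2 = (pvStepA vs D).getD kv.1 (-1) := by
    have := PySem.Dict.getD_of_mem_items (pvStepA vs D) (k := kv.1) (v := kv.2) (by exact hkv) hnodup (-1)
    omega
  have hfold : (pvStepA vs D).getD kv.1 (-1)
      = (pvProps vs D.items).foldl (fun m q => if q.1 = kv.1 then max m q.2 else m) (-1) := by
    unfold pvStepA
    rw [pvUpdFold_getD]
    simp [PySem.Dict.getD_empty]
  -- there is at least one proposal for this key, and all proposals are ≥ 0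
  have hkey : kv.1 ∈ (pvStepA vs D).keys := PySem.Dict.mem_keys_of_mem_items _ hkv
  rcases (pvStepA_mem_keys vs D hv kv.1).mp hkey with ⟨q0, hq0, hq0k⟩
  have hq0le := pvMaxfold_ub (pvProps vs D.items) (fun q => q.1 = kv.1) (fun q => q.2) q0 hq0 hq0k (-1)
  have hq0nn := pvProps_nonneg vs D.items hv q0 hq0
  constructor
  · rcases pvMaxfold_attained (pvProps vs D.items) (fun q => q.1 = kv.1) (fun q => q.2) (-1)
        with h | ⟨q, hq, hqk, hqv⟩
    · exfalso
      rw [hfold, h] at hval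
      omega
    · exact ⟨q, hq, hqk, by rw [hval, hfold, hqv]⟩
  · intro q hq hqk
    have := pvMaxfold_ub (pvProps vs D.items) (fun q => q.1 = kv.1) (fun q => q.2) q hq hqk (-1)
    rw [hval, hfold]
    exact this

theorem pvStepA_good (vs : List Int) (D : PySem.Dict (Int × Int) Int)
    (hG : pvGood D) (h0 : (0:Int) ∈ vs) : pvGood (pvStepA vs D) := by
  obtain ⟨hne, hnd, hv⟩ := hG
  have hkey : ∃ k, k ∈ (pvStepA vs D).keys := by
    rcases List.exists_mem_of_ne_nil D.items hne with ⟨kv0, hkv0⟩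
    refine ⟨(0, kv0.1.1), ?_⟩
    rw [pvStepA_mem_keys vs D hv]
    refine ⟨((0, kv0.1.1), kv0.2 + pvBC 0), ?_, rfl⟩
    rw [mem_pvProps]
    exact ⟨kv0, hkv0, 0, h0, pvBand_zero_left _, pvBand_zero_left _, rfl⟩
  refine ⟨?_, pvStepA_nodup vs D, ?_⟩
  · rcases hkey with ⟨k, hk⟩
    intro hitems
    rw [PySem.Dict.keys, hitems] at hk
    simp at hk
  · intro kv hkv
    rcases (pvStepA_item_val vs D hv kv hkv).1 with ⟨q, hq, _, hval⟩
    rw [hval]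
    exact pvProps_nonneg vs D.items hv q hq

-- the LHS max (after the A step) is the max of the same contribution set
theorem pvM_step_isMax (D : PySem.Dict (Int × Int) Int) (vs : List Int) (rest : List (List Int))
    (s : Int) (hG : pvGood D) (hM : pvM (pvStepA vs D) rest = some s) :
    pvContrib D.items vs rest s ∧ ∀ x, pvContrib D.items vs rest x → x ≤ s := by
  obtain ⟨hne, hnd, hv⟩ := hG
  constructor
  · rcases List.mem_map.mp (PySem.List.max?_mem hM) with ⟨kv, hkv, hs⟩
    rcases (pvStepA_item_val vs D hv kv hkv).1 with ⟨q, hq, hqk, hqv⟩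
    rcases (mem_pvProps vs D.items q).mp hq with ⟨kvD, hkvD, c, hc, h1, h2, hq'⟩
    refine ⟨kvD, hkvD, c, hc, h1, h2, ?_⟩
    -- s = kv.2 + bestRec rest kv.1.1 kv.1.2 ; kv.1 = (c, kvD.1.1) ; kv.2 = kvD.2 + pvBC c
    have hk1 : kv.1 = (c, kvD.1.1) := by rw [← hqk, hq']
    have hv2 : kv.2 = kvD.2 + pvBC c := by rw [hqv, hq']
    rw [← hs, hk1, hv2]
  · rintro x ⟨kvD, hkvD, c, hc, h1, h2, rfl⟩
    -- the proposal for (c, kvD.1.1)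
    have hq : ((c, kvD.1.1), kvD.2 + pvBC c) ∈ pvProps vs D.items := by
      rw [mem_pvProps]
      exact ⟨kvD, hkvD, c, hc, h1, h2, rfl⟩
    have hkey : (c, kvD.1.1) ∈ (pvStepA vs D).keys :=
      (pvStepA_mem_keys vs D hv _).mpr ⟨_, hq, rfl⟩
    rcases List.mem_map.mp hkey with ⟨kvG, hkvG, hkG⟩
    have hub := (pvStepA_item_val vs D hv kvG hkvG).2 _ hq (by rw [hkG])
    have hle := PySem.List.max?_isMax hM (kvG.2 + bestRec rest kvG.1.1 kvG.1.2)
      (List.mem_map.mpr ⟨kvG, hkvG, rfl⟩)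
    simp only at hle hub
    have h11 : kvG.1.1 = c := by rw [hkG]
    have h12 : kvG.1.2 = kvD.1.1 := by rw [hkG]
    rw [h11, h12] at hle
    omega

theorem pvM_isSome_of_good (D : PySem.Dict (Int × Int) Int) (rest : List (List Int))
    (hne : D.items ≠ []) : ∃ s, pvM D rest = some s := by
  unfold pvM
  cases h : PySem.List.max? (D.items.map (fun kv => kv.2 + bestRec rest kv.1.1 kv.1.2)) (fun v => v) with
  | none =>
    rw [PySem.List.max?_eq_none_iff] at h
    simp at h
    exact absurd h hne
  | some s => exact ⟨s, rfl⟩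

theorem pvStepA_M (D : PySem.Dict (Int × Int) Int) (vs : List Int) (rest : List (List Int))
    (hG : pvGood D) (h0 : (0:Int) ∈ vs) :
    pvM (pvStepA vs D) rest = pvM D (vs :: rest) := by
  rcases pvM_isSome_of_good (pvStepA vs D) rest (pvStepA_good vs D hG h0).1 with ⟨s', hs'⟩
  rcases pvM_isSome_of_good D (vs :: rest) hG.1 with ⟨s, hs⟩
  rw [hs', hs]
  rcases pvM_step_isMax D vs rest s' hG hs' with ⟨hat', hub'⟩
  rcases pvM_cons_isMax D vs rest s h0 hs with ⟨hat, hub⟩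
  have h1 := hub' s hat
  have h2 := hub s' hat'
  have : s' = s := le_antisymm h2 h1
  rw [this]

theorem pvChain (rs : List (List Int)) (D : PySem.Dict (Int × Int) Int)
    (hG : pvGood D) (h0 : ∀ vs ∈ rs, (0:Int) ∈ vs) :
    pvM (rs.foldl (fun D vs => pvStepA vs D) D) [] = pvM D rs := by
  induction rs generalizing D with
  | nil => rfl
  | cons vs rest ih =>
    simp only [List.foldl_cons]
    rw [ih (pvStepA vs D) (pvStepA_good vs D hG (h0 vs List.mem_cons_self))
        (fun v hv => h0 v (List.mem_cons_of_mem _ hv))]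
    exact pvStepA_M D vs rest hG (h0 vs List.mem_cons_self)

-- ---------- shared pure row-state list ----------

def pvRS (grid : List String) (as : List Int) : List (List Int) :=
  grid.map (fun row => as.filter (fun s => decide (PySem.Int.band s (Int.not (rowMask row)) = 0)))

theorem rowStatesB_eq (grid : List String) (as : List Int) :
    rowStatesB grid as = pvRS grid as := by
  unfold rowStatesB pvRS
  rw [PySem.List.foldl_append_singleton_eq_map]
  simp

-- generate_row_states as a filter over the range
theorem generateRowStates_eq (width : Int) :
    generateRowStates width =
      (PySem.List.pyRange 0 ((1:Int) <<< width.toNat) 1).filter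
        (fun s => decide (¬ PySem.Int.band s (s <<< (1:Nat)) ≠ 0 ∧ ¬ PySem.Int.band s (s <<< (2:Nat)) ≠ 0)) := by
  unfold generateRowStates
  rw [PySem.List.foldl_congr_mem _ _
    (fun states state =>
      if ¬ PySem.Int.band state (state <<< (1:Nat)) ≠ 0 ∧ ¬ PySem.Int.band state (state <<< (2:Nat)) ≠ 0
      then states ++ [state] else states) _ ?_]
  · rw [PySem.List.foldl_append_ite_eq_filter]
    simp
  · intro acc x _
    by_cases h1 : PySem.Int.band x (x <<< (1:Nat)) ≠ 0 <;>
      by_cases h2 : PySem.Int.band x (x <<< (2:Nat)) ≠ 0 <;>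
      simp [h1, h2]

theorem zero_mem_generateRowStates (width : Int) : (0:Int) ∈ generateRowStates width := by
  rw [generateRowStates_eq]
  rw [List.mem_filter]
  constructor
  · rw [PySem.List.mem_pyRange_one]
    refine ⟨le_refl 0, ?_⟩
    rw [Int.shiftLeft_eq]
    positivity
  · simp

theorem pvRS_sub (grid : List String) (as : List Int) :
    ∀ vs ∈ pvRS grid as, ∀ c ∈ vs, c ∈ as := by
  intro vs hvs c hc
  rcases List.mem_map.mp hvs with ⟨row, _, rfl⟩
  exact (List.mem_filter.mp hc).1

theorem pvRS_zero_mem (grid : List String) (as : List Int) (h0 : (0:Int) ∈ as) :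
    ∀ vs ∈ pvRS grid as, (0:Int) ∈ vs := by
  intro vs hvs
  rcases List.mem_map.mp hvs with ⟨row, _, rfl⟩
  rw [List.mem_filter]
  exact ⟨h0, by simp [pvBand_zero_left]⟩

-- bit-count dictionary lookup
theorem pvInsertFold_getD (L : List Int) (f : Int → Int) (d : PySem.Dict Int Int) (c : Int) :
    (L.foldl (fun d s => d.insert s (f s)) d).getD c 0 = if c ∈ L then f c else d.getD c 0 := by
  induction L generalizing d with
  | nil => simp
  | cons x t ih =>
    simp only [List.foldl_cons]
    rw [ih]
    by_cases hct : c ∈ t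
    · simp [hct]
    · by_cases hcx : c = x
      · subst hcx
        simp [hct]
      · simp [hct, hcx, PySem.Dict.getD_insert]

theorem bitCountDict_getD (as : List Int) (c : Int) (hc : c ∈ as) :
    (bitCountDict as).getD c 0 = pvBC c := by
  unfold bitCountDict
  rw [pvInsertFold_getD, if_pos hc]
  rfl

-- ---------- bridging port A's row-state computation ----------

theorem pvInnerFilter (as : List Int) (m : Int) :
    as.foldl (fun valid state =>
        if PySem.Int.band state (Int.not m) ≠ 0 then valid else valid ++ [state]) []
      = as.filter (fun s => decide (PySem.Int.band s (Int.not m) = 0)) := by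
  rw [PySem.List.foldl_congr_mem _ _
    (fun valid state => if PySem.Int.band state (Int.not m) = 0 then valid ++ [state] else valid) _ ?_]
  · rw [PySem.List.foldl_append_ite_eq_filter]
    simp
  · intro acc x _
    by_cases h : PySem.Int.band x (Int.not m) = 0 <;> simp [h]

theorem portA_rowStates (grid : List String) (as : List Int) :
    (PySem.List.pyRange 0 (PySem.List.len grid) 1).foldl
      (fun rss r =>
        rss ++ [as.foldl
          (fun valid state =>
            if PySem.Int.band state (Int.not (PySem.List.pyGetD (grid.foldl (fun ms row => ms ++ [rowMask row]) []) r 0)) ≠ 0 then valid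
            else valid ++ [state]) []]) []
      = pvRS grid as := by
  have hmasks : grid.foldl (fun ms row => ms ++ [rowMask row]) [] = grid.map rowMask := by
    rw [PySem.List.foldl_append_singleton_eq_map]
    simp
  rw [hmasks]
  rw [PySem.List.foldl_append_singleton_eq_map]
  rw [List.nil_append]
  have hlen : PySem.List.len grid = PySem.List.len (grid.map rowMask) := by
    simp [PySem.List.len]
  rw [hlen]
  have hmap := PySem.List.map_pyGetD_pyRange_zero (xs := grid.map rowMask) (d := 0)
  calc (PySem.List.pyRange 0 (PySem.List.len (grid.map rowMask)) 1).map
        (fun r => as.foldl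
          (fun valid state =>
            if PySem.Int.band state (Int.not (PySem.List.pyGetD (grid.map rowMask) r 0)) ≠ 0 then valid
            else valid ++ [state]) [])
      = ((PySem.List.pyRange 0 (PySem.List.len (grid.map rowMask)) 1).map
          (fun r => PySem.List.pyGetD (grid.map rowMask) r 0)).map
        (fun m => as.foldl
          (fun valid state =>
            if PySem.Int.band state (Int.not m) ≠ 0 then valid else valid ++ [state]) []) := by
        rw [List.map_map]; rfl
    _ = (grid.map rowMask).map
        (fun m => as.foldl
          (fun valid state =>
            if PySem.Int.band state (Int.not m) ≠ 0 then valid else valid ++ [state]) []) := by rw [hmap]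
    _ = pvRS grid as := by
        rw [List.map_map]
        unfold pvRS
        apply List.map_congr_left
        intro row _
        exact pvInnerFilter as (rowMask row)

-- ---------- bridging port A's dp step ----------

theorem portA_step (as vs : List Int) (hsub : ∀ c ∈ vs, c ∈ as) (D : PySem.Dict (Int × Int) Int) :
    D.items.foldl
      (fun nd kv =>
        vs.foldl
          (fun nd cur =>
            if PySem.Int.band cur kv.1.1 ≠ 0 then nd
            else if PySem.Int.band cur kv.1.2 ≠ 0 then nd
            else
              if kv.2 + (bitCountDict as).getD cur 0 > nd.getD (cur, kv.1.1) (-1) then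
                nd.insert (cur, kv.1.1) (kv.2 + (bitCountDict as).getD cur 0)
              else nd) nd) PySem.Dict.empty
      = pvStepA vs D := by
  unfold pvStepA pvProps
  rw [← pvFoldl_flatMap]
  apply PySem.List.foldl_congr_mem
  intro nd kv _
  rw [PySem.List.foldl_congr_mem _ _
    (fun nd cur =>
      if PySem.Int.band cur kv.1.1 = 0 ∧ PySem.Int.band cur kv.1.2 = 0 then
        pvUpd nd (cur, kv.1.1) (kv.2 + pvBC cur)
      else nd) _ ?_]
  · rw [PySem.List.foldl_ite_eq_foldl_filter]
    rw [List.foldl_map]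
  · intro acc cur hcur
    have hbc : (bitCountDict as).getD cur 0 = pvBC cur := bitCountDict_getD as cur (hsub cur hcur)
    rw [hbc]
    by_cases h1 : PySem.Int.band cur kv.1.1 = 0 <;> by_cases h2 : PySem.Int.band cur kv.1.2 = 0 <;>
      simp [h1, h2, pvUpd]

-- the whole dp loop of port A
theorem portA_loop (grid : List String) (as : List Int) (rsL : List (List Int))
    (hrs : rsL = pvRS grid as) :
    (PySem.List.pyRange 0 (PySem.List.len grid) 1).foldl
      (fun dp r =>
        dp.items.foldl
          (fun nd kv =>
            (PySem.List.pyGetD rsL r []).foldl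
              (fun nd cur =>
                if PySem.Int.band cur kv.1.1 ≠ 0 then nd
                else if PySem.Int.band cur kv.1.2 ≠ 0 then nd
                else
                  if kv.2 + (bitCountDict as).getD cur 0 > nd.getD (cur, kv.1.1) (-1) then
                    nd.insert (cur, kv.1.1) (kv.2 + (bitCountDict as).getD cur 0)
                  else nd) nd) PySem.Dict.empty)
      (PySem.Dict.empty.insert (0, 0) 0)
      = rsL.foldl (fun D vs => pvStepA vs D) (PySem.Dict.empty.insert (0, 0) 0) := by
  have hlen : PySem.List.len grid = PySem.List.len rsL := by
    simp [PySem.List.len, hrs, pvRS]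
  rw [hlen]
  have key := PySem.List.foldl_pyRange_zero_pyGetD rsL ([] : List Int)
    (fun dp vs =>
      dp.items.foldl
        (fun nd kv =>
          vs.foldl
            (fun nd cur =>
              if PySem.Int.band cur kv.1.1 ≠ 0 then nd
              else if PySem.Int.band cur kv.1.2 ≠ 0 then nd
              else
                if kv.2 + (bitCountDict as).getD cur 0 > nd.getD (cur, kv.1.1) (-1) then
                  nd.insert (cur, kv.1.1) (kv.2 + (bitCountDict as).getD cur 0)
                else nd) nd) PySem.Dict.empty)
    (PySem.Dict.empty.insert (0, 0) 0)
  simp only [] at key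
  rw [key]
  apply PySem.List.foldl_congr_mem
  intro acc vs hvs
  exact portA_step as vs (fun c hc => pvRS_sub grid as vs (hrs ▸ hvs) c hc) acc

-- ---------- final answer extraction for port A ----------

theorem pvAnswer (rs : List (List Int)) (h0 : ∀ vs ∈ rs, (0:Int) ∈ vs) :
    (if (rs.foldl (fun D vs => pvStepA vs D) (PySem.Dict.empty.insert (0, 0) 0)).size ≠ 0 then
      (PySem.List.max? (rs.foldl (fun D vs => pvStepA vs D) (PySem.Dict.empty.insert (0, 0) 0)).values
        (fun v => v)).getD 0
    else 0) = bestRec rs 0 0 := by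
  have hgood : pvGood (PySem.Dict.empty.insert ((0:Int), (0:Int)) (0:Int)) := by
    refine ⟨by decide, by decide, ?_⟩
    intro kv hkv
    have : (PySem.Dict.empty.insert ((0:Int),(0:Int)) (0:Int)).items = [((0,0),0)] := by decide
    rw [this] at hkv
    simp at hkv
    simp [hkv]
  have hchain := pvChain rs _ hgood h0
  have hdp0 : pvM (PySem.Dict.empty.insert ((0:Int), (0:Int)) (0:Int)) rs = some (bestRec rs 0 0) := by
    unfold pvM
    have hitems : (PySem.Dict.empty.insert ((0:Int),(0:Int)) (0:Int)).items = [((0,0),0)] := by decide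
    rw [hitems]
    simp only [List.map_cons, List.map_nil]
    have : (0:Int) + bestRec rs 0 0 = bestRec rs 0 0 := by omega
    rw [this]
    rfl
  set dpF := rs.foldl (fun D vs => pvStepA vs D) (PySem.Dict.empty.insert ((0:Int), (0:Int)) (0:Int)) with hdpF
  have hM : pvM dpF [] = some (bestRec rs 0 0) := by rw [hchain, hdp0]
  have hmapeq : (fun kv : (Int × Int) × Int => kv.2 + bestRec [] kv.1.1 kv.1.2) =
      (fun kv : (Int × Int) × Int => kv.2) := by
    funext kv
    simp [bestRec]
  have hvals : PySem.List.max? dpF.values (fun v => v) = some (bestRec rs 0 0) := by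
    unfold pvM at hM
    rw [hmapeq] at hM
    exact hM
  have hvne : dpF.values ≠ [] := by
    intro h
    rw [(PySem.List.max?_eq_none_iff dpF.values (fun v => v)).mpr h] at hvals
    simp at hvals
  have hsz : dpF.size ≠ 0 := by
    intro h
    apply hvne
    have : dpF.items.length = 0 := h
    have hit : dpF.items = [] := List.eq_nil_of_length_eq_zero this
    show dpF.items.map (fun kv => kv.2) = []
    rw [hit]
    rfl
  rw [if_pos hsz, hvals]
  rfl

theorem portA_eq (grid : List String) :
    max_artillery grid =
      bestRec (pvRS grid (generateRowStates
        (if PySem.List.len grid ≠ 0 then PySem.Str.len (PySem.List.pyGetD grid 0 "") else 0))) 0 0 := by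
  simp only [max_artillery]
  rw [portA_rowStates grid (generateRowStates
    (if PySem.List.len grid ≠ 0 then PySem.Str.len (PySem.List.pyGetD grid 0 "") else 0))]
  rw [portA_loop grid _ _ rfl]
  exact pvAnswer _ (pvRS_zero_mem grid _ (zero_mem_generateRowStates _))

-- ---------- port B: suffix table ----------

def pvStepB (rowStates : List (List Int)) (bitCount : PySem.Dict Int Int)
    (nxt : PySem.Dict (Int × Int) Int) (r : Int) : PySem.Dict (Int × Int) Int :=
  let prev1s := if r ≥ 1 then PySem.List.pyGetD rowStates (r - 1) [] else [0]
  let prev2s := if r ≥ 2 then PySem.List.pyGetD rowStates (r - 2) [] else [0]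
  prev1s.foldl
    (fun suf p1 =>
      prev2s.foldl
        (fun suf p2 =>
          let best :=
            (PySem.List.pyGetD rowStates r []).foldl
              (fun best cur =>
                if PySem.Int.band cur p1 ≠ 0 ∨ PySem.Int.band cur p2 ≠ 0 then best
                else
                  let v := bitCount.getD cur 0 + nxt.getD (cur, p1) 0
                  if v > best then v else best) 0
          suf.insert (p1, p2) best) suf) PySem.Dict.empty

theorem portB_as_stepB (grid : List String) :
    max_artillery_alt grid =
      ((PySem.List.pyRange (PySem.List.len grid - 1) (-1) (-1)).foldl
        (fun nxt r =>
          pvStepB (rowStatesB grid (generateRowStates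
            (if PySem.List.len grid ≠ 0 then PySem.Str.len (PySem.List.pyGetD grid 0 "") else 0)))
            (bitCountDict (generateRowStates
              (if PySem.List.len grid ≠ 0 then PySem.Str.len (PySem.List.pyGetD grid 0 "") else 0)))
            nxt r)
        PySem.Dict.empty).getD (0, 0) 0 := rfl

def pvS (rsL : List (List Int)) (bcD : PySem.Dict Int Int) (r : Nat) : PySem.Dict (Int × Int) Int :=
  (PySem.List.pyRange (r : Int) (rsL.length : Int) 1).foldr
    (fun x acc => pvStepB rsL bcD acc x) PySem.Dict.empty

theorem portB_foldl_eq_pvS (rsL : List (List Int)) (bcD : PySem.Dict Int Int) (n : Int)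
    (hn : n = (rsL.length : Int)) :
    (PySem.List.pyRange (n - 1) (-1) (-1)).foldl (fun nxt r => pvStepB rsL bcD nxt r) PySem.Dict.empty
      = pvS rsL bcD 0 := by
  have h1 : PySem.List.pyRange (n - 1) (-1) (-1) = (PySem.List.pyRange 0 n 1).reverse := by
    rw [PySem.List.pyRange_neg_one_eq_reverse]
    norm_num
  rw [h1, List.foldl_reverse]
  unfold pvS
  rw [hn]
  norm_num

def pvP1 (rsL : List (List Int)) (r : Nat) : List Int := if r = 0 then [0] else rsL.getD (r - 1) []
def pvP2 (rsL : List (List Int)) (r : Nat) : List Int := if r ≤ 1 then [0] else rsL.getD (r - 2) []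

-- product-insert lookup
theorem pvInner_get? (p1 : Int) (p2s : List Int) (g : Int → Int → Int)
    (d : PySem.Dict (Int × Int) Int) (a b : Int) :
    (p2s.foldl (fun d p2 => d.insert (p1, p2) (g p1 p2)) d).get? (a, b)
      = if a = p1 ∧ b ∈ p2s then some (g p1 b) else d.get? (a, b) := by
  induction p2s generalizing d with
  | nil => simp
  | cons p2 t ih =>
    simp only [List.foldl_cons]
    rw [ih]
    by_cases hbt : b ∈ t
    · by_cases ha : a = p1
      · simp [ha, hbt]
      · simp only [ha, hbt, if_false, and_true, List.mem_cons, or_true]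
        rw [PySem.Dict.get?_insert]
        simp [Prod.ext_iff, ha]
    · rw [PySem.Dict.get?_insert]
      by_cases ha : a = p1
      · subst ha
        by_cases hb : b = p2
        · subst hb
          simp [hbt]
        · simp [hbt, hb, Prod.ext_iff]
      · simp [ha, Prod.ext_iff]

theorem pvProd_get? (p1s p2s : List Int) (g : Int → Int → Int)
    (d : PySem.Dict (Int × Int) Int) (a b : Int) :
    (p1s.foldl (fun d p1 => p2s.foldl (fun d p2 => d.insert (p1, p2) (g p1 p2)) d) d).get? (a, b)
      = if a ∈ p1s ∧ b ∈ p2s then some (g a b) else d.get? (a, b) := by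
  induction p1s generalizing d with
  | nil => simp
  | cons p1 t ih =>
    simp only [List.foldl_cons]
    rw [ih]
    by_cases hat : a ∈ t
    · by_cases hb : b ∈ p2s
      · simp [hat, hb]
      · simp only [hat, hb, and_false, if_false, List.mem_cons, or_true]
        rw [pvInner_get?]
        simp [hb]
    · rw [pvInner_get?]
      by_cases ha : a = p1
      · subst ha
        by_cases hb : b ∈ p2s <;> simp [hat, hb]
      · simp [ha, hat]

theorem pvSInv (rsL : List (List Int)) (bcD : PySem.Dict Int Int) (as : List Int)
    (hbc : ∀ c ∈ as, bcD.getD c 0 = pvBC c)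
    (hsub : ∀ vs ∈ rsL, ∀ c ∈ vs, c ∈ as) :
    ∀ (k r : Nat), r + k = rsL.length →
      ∀ p1 p2, p1 ∈ pvP1 rsL r → p2 ∈ pvP2 rsL r →
        (pvS rsL bcD r).getD (p1, p2) 0 = bestRec (rsL.drop r) p1 p2 := by
  intro k
  induction k with
  | zero =>
    intro r hr p1 p2 _ _
    have hr' : r = rsL.length := by omega
    unfold pvS
    rw [PySem.List.pyRange_one_eq_nil (by exact_mod_cast le_of_eq (by rw [hr']))]
    rw [hr', List.drop_length]
    simp [bestRec, PySem.Dict.getD_empty]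
  | succ k ih =>
    intro r hr p1 p2 hp1 hp2
    have hrlt : r < rsL.length := by omega
    unfold pvS
    rw [PySem.List.pyRange_one_cons (by exact_mod_cast hrlt)]
    rw [List.foldr_cons]
    have hcast : ((r : Int) + 1) = (((r + 1 : Nat)) : Int) := by simp
    rw [hcast]
    -- name the inner value function
    have e1 : (if (r : Int) ≥ 1 then PySem.List.pyGetD rsL ((r : Int) - 1) [] else [0]) = pvP1 rsL r := by
      unfold pvP1
      by_cases h0 : r = 0
      · subst h0; norm_num
      · rw [if_pos (by exact_mod_cast Nat.one_le_iff_ne_zero.mpr h0)]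
        rw [if_neg h0]
        rw [PySem.List.pyGetD_eq_getElem rsL [] (by omega) (by omega)]
        rw [List.getD_eq_getElem rsL [] (by omega)]
        congr 1
        omega
    have e2 : (if (r : Int) ≥ 2 then PySem.List.pyGetD rsL ((r : Int) - 2) [] else [0]) = pvP2 rsL r := by
      unfold pvP2
      by_cases h0 : r ≤ 1
      · rw [if_neg (by exact_mod_cast (by omega : ¬ ((2:Int) ≤ (r:Int)))), if_pos h0]
      · rw [if_pos (by exact_mod_cast (by omega : (2:Int) ≤ (r:Int))), if_neg h0]
        rw [PySem.List.pyGetD_eq_getElem rsL [] (by omega) (by omega)]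
        rw [List.getD_eq_getElem rsL [] (by omega)]
        congr 1
        omega
    show ((if (r : Int) ≥ 1 then PySem.List.pyGetD rsL ((r : Int) - 1) [] else [0]).foldl
        (fun suf p1 =>
          (if (r : Int) ≥ 2 then PySem.List.pyGetD rsL ((r : Int) - 2) [] else [0]).foldl
            (fun suf p2 =>
              suf.insert (p1, p2)
                ((PySem.List.pyGetD rsL (r : Int) []).foldl
                  (fun best cur =>
                    if PySem.Int.band cur p1 ≠ 0 ∨ PySem.Int.band cur p2 ≠ 0 then best
                    else
                      if bcD.getD cur 0 + (pvS rsL bcD (r + 1)).getD (cur, p1) 0 > best then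
                        bcD.getD cur 0 + (pvS rsL bcD (r + 1)).getD (cur, p1) 0
                      else best) 0)) suf) PySem.Dict.empty).getD (p1, p2) 0
      = bestRec (rsL.drop r) p1 p2
    · rw [e1, e2]
      rw [PySem.Dict.getD_eq_get?_getD]
      have key := pvProd_get? (pvP1 rsL r) (pvP2 rsL r)
        (fun p1 p2 =>
          (PySem.List.pyGetD rsL (r : Int) []).foldl
            (fun best cur =>
              if PySem.Int.band cur p1 ≠ 0 ∨ PySem.Int.band cur p2 ≠ 0 then best
              else
                if bcD.getD cur 0 + (pvS rsL bcD (r + 1)).getD (cur, p1) 0 > best then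
                  bcD.getD cur 0 + (pvS rsL bcD (r + 1)).getD (cur, p1) 0
                else best) 0)
        PySem.Dict.empty p1 p2
      simp only [] at key
      rw [key, if_pos ⟨hp1, hp2⟩, Option.getD_some]
      -- now show the inner fold is bestRec on the dropped suffix
      have hgetr : PySem.List.pyGetD rsL (r : Int) [] = rsL[r] := by
        rw [PySem.List.pyGetD_eq_getElem rsL [] (by omega) (by exact_mod_cast hrlt)]
        simp
      rw [hgetr, List.drop_eq_getElem_cons hrlt]
      show _ = bestRec (rsL[r] :: rsL.drop (r + 1)) p1 p2
      unfold bestRec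
      apply PySem.List.foldl_congr_mem
      intro best cur hcur
      have hcas : cur ∈ as := hsub rsL[r] (List.getElem_mem hrlt) cur hcur
      have hXa : bcD.getD cur 0 = pvBC cur := hbc cur hcas
      have hXb : (pvS rsL bcD (r + 1)).getD (cur, p1) 0 = bestRec (rsL.drop (r + 1)) cur p1 := by
        apply ih (r + 1) (by omega)
        · unfold pvP1
          rw [if_neg (by omega)]
          simp only [Nat.add_sub_cancel]
          rw [List.getD_eq_getElem rsL [] (by omega)]
          exact hcur
        · unfold pvP2
          by_cases h0 : r = 0
          · subst h0
            rw [if_pos (by omega)]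
            unfold pvP1 at hp1
            rw [if_pos rfl] at hp1
            exact hp1
          · rw [if_neg (by omega)]
            unfold pvP1 at hp1
            rw [if_neg h0] at hp1
            have : r + 1 - 2 = r - 1 := by omega
            rw [this]
            exact hp1
      rw [hXa, hXb]
      by_cases h1 : PySem.Int.band cur p1 = 0 <;> by_cases h2 : PySem.Int.band cur p2 = 0
      · rw [if_neg (by simp [h1, h2])]
        rw [if_pos (show PySem.Int.band cur p1 = 0 ∧ PySem.Int.band cur p2 = 0 from ⟨h1, h2⟩)]
        by_cases h : pvBC cur + bestRec (rsL.drop (r + 1)) cur p1 > best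
        · rw [if_pos h, max_eq_right (by omega)]
        · rw [if_neg h, max_eq_left (by omega)]
      · rw [if_pos (by simp [h1, h2]), if_neg (by simp [h2])]
      · rw [if_pos (by simp [h1]), if_neg (by simp [h1])]
      · rw [if_pos (by simp [h1]), if_neg (by simp [h1])]

theorem portB_eq (grid : List String) :
    max_artillery_alt grid =
      bestRec (pvRS grid (generateRowStates
        (if PySem.List.len grid ≠ 0 then PySem.Str.len (PySem.List.pyGetD grid 0 "") else 0))) 0 0 := by
  rw [portB_as_stepB, rowStatesB_eq]
  rw [portB_foldl_eq_pvS _ _ _ (by simp [PySem.List.len, pvRS])]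
  have h := pvSInv (pvRS grid (generateRowStates
      (if PySem.List.len grid ≠ 0 then PySem.Str.len (PySem.List.pyGetD grid 0 "") else 0)))
    (bitCountDict (generateRowStates
      (if PySem.List.len grid ≠ 0 then PySem.Str.len (PySem.List.pyGetD grid 0 "") else 0)))
    (generateRowStates
      (if PySem.List.len grid ≠ 0 then PySem.Str.len (PySem.List.pyGetD grid 0 "") else 0))
    (fun c hc => bitCountDict_getD _ c hc)
    (pvRS_sub _ _)
    ((pvRS grid (generateRowStates
      (if PySem.List.len grid ≠ 0 then PySem.Str.len (PySem.List.pyGetD grid 0 "") else 0))).length)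
    0 (by omega) 0 0 (by simp [pvP1]) (by simp [pvP2])
  rw [List.drop_zero] at h
  exact h

theorem pv_main (grid : List String) : max_artillery grid = max_artillery_alt grid := by
  rw [portA_eq, portB_eq]

-- ===== VERDICT (by name: the statement is the Claim_ definition above) =====
theorem max_artillery_spec : Claim_equal_max_artillery := by
  intro grid _
  unfold Spec_max_artillery
  exact pv_main grid
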